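-- pv_equiv track=rewrite | github.com/shacharbard/token-smithers | src/token_sieve/adapters/compression/error_stack_compressor.py | _split_python_tracebacks
-- ===== SOURCE A (Python) =====
-- _PY_TB_START = "Traceback (most recent call last):"
--
-- def _split_python_tracebacks(content: str) -> list[str]:
--     """Split content into individual Python tracebacks."""
--     tracebacks: list[str] = []
--     current: list[str] = []
--     in_traceback = False
--
--     for line in content.split("\n"):
--         if line.strip() == _PY_TB_START:
--             if current and in_traceback:
--                 tracebacks.append("\n".join(current))
--             current = [line]
--             in_traceback = True
--         elif in_traceback:
--             current.append(line)
--             # Exception line (not indented, not empty) ends the traceback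
--             if line.strip() and not line.startswith(" ") and line != _PY_TB_START:
--                 tracebacks.append("\n".join(current))
--                 current = []
--                 in_traceback = False
--         else:
--             # Non-traceback content
--             if current:
--                 current.append(line)
--
--     if current and in_traceback:
--         tracebacks.append("\n".join(current))
--
--     return tracebacks
-- ===== SOURCE B (Python) =====
-- _PY_TB_START = "Traceback (most recent call last):"
--
--
-- def _block_of(seg):
--     # seg begins with a start-marker line; cut at the first terminating
--     # exception line (non-empty, not indented), inclusive; else keep all of seg
--     for j, ln in enumerate(seg[1:]):
--         if ln.strip() and not ln.startswith(" "):
--             return seg[: j + 2]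
--     return seg
--
--
-- def _split_python_tracebacks(content: str) -> list[str]:
--     lines = content.split("\n")
--     starts = [i for i in range(len(lines)) if lines[i].strip() == _PY_TB_START]
--     bounds = starts[1:] + [len(lines)]
--     return [
--         "\n".join(_block_of(lines[s:nxt])) for s, nxt in zip(starts, bounds)
--     ]
-- ===== Notes on version B (the rewrite author's own statement) =====
-- stated objective: alternative
-- what changed: B replaces A's single-pass state machine (current buffer + in_traceback flag) by a two-phase index decomposition: it first collects the indices of all start-marker lines, then cuts each inter-start segment at its first terminating exception line.
import Mathlib
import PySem

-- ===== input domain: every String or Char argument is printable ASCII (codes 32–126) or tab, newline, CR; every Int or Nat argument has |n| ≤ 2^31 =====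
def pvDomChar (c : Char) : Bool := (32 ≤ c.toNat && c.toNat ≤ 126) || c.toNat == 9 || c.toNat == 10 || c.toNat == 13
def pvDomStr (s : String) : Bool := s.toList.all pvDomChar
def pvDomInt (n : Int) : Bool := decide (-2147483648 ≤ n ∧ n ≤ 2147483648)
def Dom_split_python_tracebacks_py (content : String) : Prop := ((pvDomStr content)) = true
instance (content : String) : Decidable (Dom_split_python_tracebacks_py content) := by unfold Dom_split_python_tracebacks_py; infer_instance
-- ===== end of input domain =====

-- B re-implements the split in two phases (collect start-line indices, then cut each
-- inter-start segment at its first terminating exception line) instead of A's running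
-- state machine; objective: alternative decomposition, same O(n) cost.

def pvStart : String := "Traceback (most recent call last):"

-- ===== PORT A =====
def pvStepA (st : List String × List String × Bool) (line : String) :
    List String × List String × Bool :=
  let tbs := st.1; let cur := st.2.1; let inTb := st.2.2
  if PySem.Str.strip line = pvStart then
    ((if cur ≠ [] ∧ inTb then tbs ++ [PySem.Str.join "\n" cur] else tbs), [line], true)
  else if inTb then
    let cur := cur ++ [line]
    if PySem.Str.strip line ≠ "" ∧ PySem.Str.startswith line " " = false ∧ line ≠ pvStart then
      (tbs ++ [PySem.Str.join "\n" cur], [], false)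
    else (tbs, cur, true)
  else
    (tbs, (if cur ≠ [] then cur ++ [line] else cur), false)

def split_python_tracebacks_py (content : String) : List String :=
  let r := (((PySem.Str.split? content "\n").getD [])).foldl pvStepA ([], [], false)
  if r.2.1 ≠ [] ∧ r.2.2 then r.1 ++ [PySem.Str.join "\n" r.2.1] else r.1

-- ===== PORT B =====
def pvIsTerm (ln : String) : Bool :=
  (!(PySem.Str.strip ln == "")) && (!(PySem.Str.startswith ln " "))

-- port of _block_of: scan seg[1:] for the first terminating line, cut inclusively
def pvBlockOf (seg : List String) : List String :=
  match (seg.drop 1).findIdx? pvIsTerm with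
  | some j => seg.take (j + 2)
  | none => seg

def split_python_tracebacks_py_alt (content : String) : List String :=
  let lines := ((PySem.Str.split? content "\n").getD [])
  let starts := (List.range lines.length).filter
    (fun i => PySem.Str.strip (lines.getD i "") == pvStart)
  let bounds := starts.drop 1 ++ [lines.length]
  (starts.zip bounds).map
    (fun p => PySem.Str.join "\n" (pvBlockOf ((lines.drop p.1).take (p.2 - p.1))))

-- ===== PRECONDITION & SPEC =====
def Spec_split_python_tracebacks_py (content : String) (out : List String) : Prop := out = split_python_tracebacks_py_alt content
instance (content : String) (out : List String) : Decidable (Spec_split_python_tracebacks_py content out) := by unfold Spec_split_python_tracebacks_py; infer_instance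

-- ===== CLAIM (what is proved, stated in full; the proofs are below) =====
def Claim_equal_split_python_tracebacks_py : Prop := ∀ (content : String), Dom_split_python_tracebacks_py content → Spec_split_python_tracebacks_py content (split_python_tracebacks_py content)

-- ===== LEMMAS AND PROOFS =====

-- the common functional specification: A's state machine written as structural recursion;
-- state none = outside a traceback, some cur = inside one with accumulated lines cur
def pvSpec : List String → Option (List String) → List String
  | [], none => []
  | [], some cur => [PySem.Str.join "\n" cur]
  | l :: t, none =>
      if PySem.Str.strip l = pvStart then pvSpec t (some [l]) else pvSpec t none
  | l :: t, some cur =>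
      if PySem.Str.strip l = pvStart then
        PySem.Str.join "\n" cur :: pvSpec t (some [l])
      else if pvIsTerm l then
        PySem.Str.join "\n" (cur ++ [l]) :: pvSpec t none
      else pvSpec t (some (cur ++ [l]))

theorem pvStrip_start : PySem.Str.strip pvStart = pvStart := by decide

theorem pvFoldA (ls : List String) : ∀ (acc : List String) (o : Option (List String)),
    (∀ c, o = some c → c ≠ []) →
    (let st := ls.foldl pvStepA (acc, o.getD [], o.isSome);
     if st.2.1 ≠ [] ∧ st.2.2 then st.1 ++ [PySem.Str.join "\n" st.2.1] else st.1)
      = acc ++ pvSpec ls o := by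
  induction ls with
  | nil =>
    intro acc o ho
    cases o with
    | none => simp [pvSpec]
    | some c => simp [pvSpec, ho c rfl]
  | cons l t ih =>
    intro acc o ho
    cases o with
    | none =>
      by_cases hs : PySem.Str.strip l = pvStart
      · have step : pvStepA (acc, [], false) l = (acc, [l], true) := by
          simp [pvStepA, hs]
        have h2 := ih acc (some [l]) (by intro c hc; cases hc; simp)
        simp only [Option.getD, Option.isSome, List.foldl_cons, step] at h2 ⊢
        simpa [pvSpec, hs] using h2
      · have step : pvStepA (acc, [], false) l = (acc, [], false) := by
          simp [pvStepA, hs]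
        have h2 := ih acc none (by intro c hc; cases hc)
        simp only [Option.getD, Option.isSome, List.foldl_cons, step] at h2 ⊢
        simpa [pvSpec, hs] using h2
    | some c =>
      have hc : c ≠ [] := ho c rfl
      by_cases hs : PySem.Str.strip l = pvStart
      · have step : pvStepA (acc, c, true) l = (acc ++ [PySem.Str.join "\n" c], [l], true) := by
          simp [pvStepA, hs, hc]
        have h2 := ih (acc ++ [PySem.Str.join "\n" c]) (some [l]) (by intro d hd; cases hd; simp)
        simp only [Option.getD, Option.isSome, List.foldl_cons, step] at h2 ⊢
        rw [h2]
        simp [pvSpec, hs]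
      · by_cases hterm : pvIsTerm l = true
        · obtain ⟨h1, h2⟩ : ¬ PySem.Str.strip l = "" ∧ PySem.Str.startswith l " " = false := by
            simpa [pvIsTerm] using hterm
          have hne : l ≠ pvStart := by
            intro h; rw [h, pvStrip_start] at hs; exact hs rfl
          have h2' : PySem.Chars.startswith l.toList [' '] = false := by
            simpa using h2
          have step : pvStepA (acc, c, true) l =
              (acc ++ [PySem.Str.join "\n" (c ++ [l])], [], false) := by
            simp [pvStepA, hs, h1, h2', hne]
          have h3 := ih (acc ++ [PySem.Str.join "\n" (c ++ [l])]) none (by intro d hd; cases hd)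
          simp only [Option.getD, Option.isSome, List.foldl_cons, step] at h3 ⊢
          rw [h3]
          simp [pvSpec, hs, hterm]
        · have h' : pvIsTerm l = false := by
            revert hterm; cases pvIsTerm l <;> simp
          have hcond : PySem.Str.strip l = "" ∨ PySem.Chars.startswith l.toList [' '] = true := by
            by_cases hx : PySem.Str.strip l = ""
            · exact Or.inl hx
            · right; simpa [pvIsTerm, hx] using h'
          have hno : ¬ (¬ PySem.Str.strip l = "" ∧ PySem.Str.startswith l " " = false ∧
              l ≠ pvStart) := by
            rintro ⟨a, b, -⟩
            rcases hcond with hx | hx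
            · exact a hx
            · exact absurd hx (by simpa using b)
          have step : pvStepA (acc, c, true) l = (acc, c ++ [l], true) := by
            simp only [pvStepA, if_neg hs, if_neg hno, if_pos trivial]
          have h2 := ih acc (some (c ++ [l])) (by intro d hd; cases hd; simp)
          simp only [Option.getD, Option.isSome, List.foldl_cons, step] at h2 ⊢
          rw [h2]
          simp [pvSpec, hs, h']

-- filter over range' inversion and shifting
theorem pvFilterNil (Q : Nat → Bool) (p n : Nat) (h : ∀ j, p ≤ j → j < p + n → Q j = false) :
    (List.range' p n).filter Q = [] := by
  rw [List.filter_eq_nil_iff]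
  intro j hj
  rw [List.mem_range'_1] at hj
  simp [h j hj.1 hj.2]

theorem pvFilterCons (Q : Nat → Bool) : ∀ (n p s : Nat) (rest : List Nat),
    (List.range' p n).filter Q = s :: rest →
    p ≤ s ∧ s < p + n ∧ Q s = true ∧ (∀ j, p ≤ j → j < s → Q j = false) ∧
      rest = (List.range' (s + 1) (p + n - s - 1)).filter Q := by
  intro n
  induction n with
  | zero => intro p s rest h; simp at h
  | succ n ih =>
    intro p s rest h
    rw [List.range'_succ, List.filter_cons] at h
    by_cases hq : Q p = true
    · simp only [hq, if_pos] at h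
      obtain ⟨h1, h2⟩ := List.cons.inj h
      subst h1
      refine ⟨le_refl _, by omega, hq, by omega, ?_⟩
      rw [← h2]; congr 2; omega
    · simp only [hq, if_neg, Bool.false_eq_true, not_false_iff] at h
      obtain ⟨h1, h2, h3, h4, h5⟩ := ih (p + 1) s rest h
      refine ⟨by omega, by omega, h3, ?_, ?_⟩
      · intro j hj1 hj2
        rcases Nat.eq_or_lt_of_le hj1 with rfl | hlt
        · simpa using hq
        · exact h4 j hlt hj2
      · rw [h5]; congr 2; omega

theorem pvFilterShift (Q : Nat → Bool) (p q n : Nat) (hpq : p ≤ q) (hqn : q ≤ p + n)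
    (h : ∀ j, p ≤ j → j < q → Q j = false) :
    (List.range' p n).filter Q = (List.range' q (p + n - q)).filter Q := by
  have hsplit : List.range' p (q - p) ++ List.range' q (p + n - q) = List.range' p n := by
    have h2 : List.range' p (q - p) ++ List.range' (p + 1 * (q - p)) (p + n - q) 1 =
        List.range' p ((q - p) + (p + n - q)) 1 := List.range'_append ..
    simp only [one_mul] at h2
    rw [show p + (q - p) = q by omega] at h2
    rw [h2]; congr 1; omega
  rw [← hsplit, List.filter_append, pvFilterNil Q p (q - p) (fun j h1 h2 => h j h1 (by omega))]
  simp

-- pvSpec skipping lemmas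
theorem pvSpecSkip (pre rest : List String) (h : ∀ l ∈ pre, ¬ PySem.Str.strip l = pvStart) :
    pvSpec (pre ++ rest) none = pvSpec rest none := by
  induction pre with
  | nil => simp
  | cons l t ih =>
    have hl := h l (by simp)
    simp only [List.cons_append, pvSpec, if_neg hl]
    exact ih (fun x hx => h x (by simp [hx]))

theorem pvSpecExt (pre : List String)
    (h : ∀ l ∈ pre, ¬ PySem.Str.strip l = pvStart ∧ pvIsTerm l = false) :
    ∀ (rest : List String) (cur : List String),
    pvSpec (pre ++ rest) (some cur) = pvSpec rest (some (cur ++ pre)) := by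
  induction pre with
  | nil => simp
  | cons l t ih =>
    intro rest cur
    obtain ⟨hs, ht⟩ := h l (by simp)
    simp only [List.cons_append, pvSpec, if_neg hs, ht, Bool.false_eq_true, if_false]
    rw [ih (fun x hx => h x (by simp [hx])) rest (cur ++ [l])]
    simp

theorem pvMemTakeIdx {α : Type} (xs : List α) (k : Nat) :
    ∀ x ∈ xs.take k, ∃ (i : Nat) (h : i < xs.length), i < k ∧ xs[i] = x := by
  intro x hx
  obtain ⟨i, hi, hget⟩ := List.getElem_of_mem hx
  have hlen : i < xs.length ∧ i < k := by
    have := hi; simp [List.length_take] at this; omega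
  exact ⟨i, hlen.1, hlen.2, by rw [← List.getElem_take (h := hi)]; exact hget⟩

theorem pvMemDropTake (lines : List String) (p k : Nat) :
    ∀ l ∈ (lines.drop p).take k,
      ∃ j, p ≤ j ∧ j < p + k ∧ j < lines.length ∧ lines.getD j "" = l := by
  intro l hl
  obtain ⟨i, hi, hik, hget⟩ := pvMemTakeIdx (lines.drop p) k l hl
  have hlen : p + i < lines.length := by
    have := hi; simp [List.length_drop] at this; omega
  refine ⟨p + i, by omega, by omega, hlen, ?_⟩
  rw [List.getD_eq_getElem _ _ hlen, ← List.getElem_drop (h := hi)]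
  exact hget

theorem pvMemDropAll (lines : List String) (p : Nat) :
    ∀ l ∈ lines.drop p,
      ∃ j, p ≤ j ∧ j < lines.length ∧ lines.getD j "" = l := by
  intro l hl
  have : l ∈ (lines.drop p).take (lines.length - p) := by
    rwa [List.take_of_length_le (by simp)]
  obtain ⟨j, h1, h2, h3, h4⟩ := pvMemDropTake lines p (lines.length - p) l this
  exact ⟨j, h1, h3, h4⟩

set_option maxHeartbeats 1000000 in
theorem pvBlockStep (lines : List String) (s nxt : Nat)
    (hs : s < lines.length) (hsn : s + 1 ≤ nxt) (hnl : nxt ≤ lines.length)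
    (noQ : ∀ j, s + 1 ≤ j → j < nxt → ¬ PySem.Str.strip (lines.getD j "") = pvStart)
    (hnxt : nxt = lines.length ∨ PySem.Str.strip (lines.getD nxt "") = pvStart) :
    pvSpec (lines.drop (s + 1)) (some [lines.getD s ""]) =
      PySem.Str.join "\n" (pvBlockOf ((lines.drop s).take (nxt - s))) ::
        pvSpec (lines.drop nxt) none := by
  set g : Nat → String := fun i => lines.getD i "" with hg
  set mid : List String := (lines.drop (s + 1)).take (nxt - s - 1) with hmid
  have hsplit : lines.drop (s + 1) = mid ++ lines.drop nxt := by
    rw [hmid]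
    conv_lhs => rw [← List.take_append_drop (nxt - s - 1) (lines.drop (s + 1))]
    rw [List.drop_drop, show s + 1 + (nxt - s - 1) = nxt by omega]
  have hmidNoStart : ∀ l ∈ mid, ¬ PySem.Str.strip l = pvStart := by
    intro l hl
    obtain ⟨j, h1, h2, _, h4⟩ := pvMemDropTake lines (s + 1) (nxt - s - 1) l hl
    rw [← h4]; exact noQ j h1 (by omega)
  have hseg : (lines.drop s).take (nxt - s) = g s :: mid := by
    rw [List.drop_eq_getElem_cons hs, show nxt - s = (nxt - s - 1) + 1 by omega,
      List.take_succ_cons, hmid, hg]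
    simp [List.getElem?_eq_getElem hs]
  have hstepNxt : pvSpec (lines.drop nxt) (some ([g s] ++ mid)) =
      PySem.Str.join "\n" ([g s] ++ mid) :: pvSpec (lines.drop nxt) none := by
    rcases hnxt with h | h
    · rw [h, List.drop_length]; simp [pvSpec]
    · have hn : nxt < lines.length := by
        rcases Nat.lt_or_ge nxt lines.length with h' | h'
        · exact h'
        · exfalso
          have hback : nxt = lines.length := by omega
          rw [hback] at h; simp [List.getD] at h
          exact absurd h (by decide)
      have hgn : lines[nxt] = g nxt := by rw [hg]; simp [List.getElem?_eq_getElem hn]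
      rw [List.drop_eq_getElem_cons hn, hgn]
      have h' : PySem.Str.strip (g nxt) = pvStart := h
      simp [pvSpec, h']
  rw [hsplit]
  cases hf : mid.findIdx? pvIsTerm with
  | none =>
    have hnoTerm : ∀ l ∈ mid, pvIsTerm l = false := List.findIdx?_eq_none_iff.mp hf
    rw [pvSpecExt mid (fun l hl => ⟨hmidNoStart l hl, hnoTerm l hl⟩) (lines.drop nxt) [g s]]
    rw [hstepNxt]
    congr 2
    rw [hseg]
    unfold pvBlockOf
    simp only [List.drop_one, List.tail_cons, hf]
    simp
  | some j =>
    obtain ⟨hjlen, hjterm, hjmin⟩ := List.findIdx?_eq_some_iff_getElem.mp hf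
    set pre : List String := mid.take j with hpre
    have hmidsplit : mid = pre ++ mid[j] :: mid.drop (j + 1) := by
      conv_lhs => rw [← List.take_append_drop j mid]
      rw [List.drop_eq_getElem_cons hjlen]
    have hpreOk : ∀ l ∈ pre, ¬ PySem.Str.strip l = pvStart ∧ pvIsTerm l = false := by
      intro l hl
      obtain ⟨i, hi, hik, hget⟩ := pvMemTakeIdx mid j l hl
      refine ⟨hmidNoStart l (by rw [← hget]; exact List.getElem_mem hi), ?_⟩
      rw [← hget]
      exact Bool.not_eq_true _ ▸ (hjmin i hik)
    have hmj : mid[j] ∈ mid := List.getElem_mem hjlen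
    calc pvSpec (mid ++ lines.drop nxt) (some [g s])
        = pvSpec (pre ++ (mid[j] :: (mid.drop (j + 1) ++ lines.drop nxt))) (some [g s]) := by
          have e : mid ++ lines.drop nxt =
              pre ++ (mid[j] :: (mid.drop (j + 1) ++ lines.drop nxt)) := by
            conv_lhs => rw [hmidsplit]
            simp only [List.append_assoc, List.cons_append]
          rw [e]
      _ = pvSpec (mid[j] :: (mid.drop (j + 1) ++ lines.drop nxt)) (some ([g s] ++ pre)) :=
          pvSpecExt pre hpreOk _ _
      _ = PySem.Str.join "\n" (([g s] ++ pre) ++ [mid[j]]) ::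
            pvSpec (mid.drop (j + 1) ++ lines.drop nxt) none := by
          simp only [pvSpec, if_neg (hmidNoStart _ hmj), if_pos hjterm]
      _ = PySem.Str.join "\n" (([g s] ++ pre) ++ [mid[j]]) ::
            pvSpec (lines.drop nxt) none := by
          rw [pvSpecSkip _ _ (fun l hl => hmidNoStart l (List.mem_of_mem_drop hl))]
    congr 2
    rw [hseg]
    unfold pvBlockOf
    simp only [List.drop_one, List.tail_cons, hf]
    rw [show j + 2 = (j + 1) + 1 by omega, List.take_succ_cons, List.take_add_one]
    simp [List.getElem?_eq_getElem hjlen, hpre]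

theorem pvMainB (lines : List String) : ∀ (ss : List Nat) (p : Nat),
    ss = (List.range' p (lines.length - p)).filter
        (fun i => PySem.Str.strip (lines.getD i "") == pvStart) →
    p ≤ lines.length →
    pvSpec (lines.drop p) none =
      (ss.zip (ss.drop 1 ++ [lines.length])).map
        (fun q => PySem.Str.join "\n" (pvBlockOf ((lines.drop q.1).take (q.2 - q.1)))) := by
  intro ss
  induction ss with
  | nil =>
    intro p h hp
    have hnoQ : ∀ l ∈ lines.drop p, ¬ PySem.Str.strip l = pvStart := by
      intro l hl
      obtain ⟨j, h1, h2, h3⟩ := pvMemDropAll lines p l hl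
      have hj := List.filter_eq_nil_iff.mp h.symm j (by rw [List.mem_range'_1]; omega)
      rw [← h3]; simpa using hj
    have := pvSpecSkip (lines.drop p) [] hnoQ
    simpa using this
  | cons s rest ih =>
    intro p h hp
    obtain ⟨hps, hslt, hQs, hmin, hrest⟩ :=
      pvFilterCons (fun i => PySem.Str.strip (lines.getD i "") == pvStart)
        (lines.length - p) p s rest h.symm
    have hslen : s < lines.length := by omega
    have hQs' : PySem.Str.strip (lines.getD s "") = pvStart := by simpa using hQs
    -- skip [p, s)
    have hskip : pvSpec (lines.drop p) none = pvSpec (lines.drop s) none := by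
      conv_lhs => rw [← List.take_append_drop (s - p) (lines.drop p)]
      rw [List.drop_drop, show p + (s - p) = s by omega]
      apply pvSpecSkip
      intro l hl
      obtain ⟨j, h1, h2, _, h4⟩ := pvMemDropTake lines p (s - p) l hl
      have := hmin j h1 (by omega)
      rw [← h4]; simpa using this
    have hstep : pvSpec (lines.drop s) none =
        pvSpec (lines.drop (s + 1)) (some [lines.getD s ""]) := by
      rw [List.drop_eq_getElem_cons hslen]
      have hgs : lines[s] = lines.getD s "" := (List.getD_eq_getElem _ _ hslen).symm
      have hQ2 : PySem.Str.strip lines[s] = pvStart := by rw [hgs]; exact hQs'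
      simp only [pvSpec, hgs]
      rw [if_pos hQs']
    rw [hskip, hstep]
    have hrest' : rest = (List.range' (s + 1) (lines.length - (s + 1))).filter
        (fun i => PySem.Str.strip (lines.getD i "") == pvStart) := by
      rw [hrest]; congr 2; omega
    cases hr : rest with
    | nil =>
      rw [hr] at hrest'
      have hnoQ : ∀ j, s + 1 ≤ j → j < lines.length →
          ¬ PySem.Str.strip (lines.getD j "") = pvStart := by
        intro j h1 h2
        have := List.filter_eq_nil_iff.mp hrest'.symm j (by rw [List.mem_range'_1]; omega)
        simpa using this
      have hblock := pvBlockStep lines s lines.length hslen (by omega) (le_refl _)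
        hnoQ (Or.inl rfl)
      rw [hblock, List.drop_length]
      simp [pvSpec]
    | cons r rest' =>
      rw [hr] at hrest'
      obtain ⟨hsr, hrlt, hQr, hminr, _⟩ :=
        pvFilterCons (fun i => PySem.Str.strip (lines.getD i "") == pvStart)
          (lines.length - (s + 1)) (s + 1) r rest' hrest'.symm
      have hrlen : r < lines.length := by omega
      have hQr' : PySem.Str.strip (lines.getD r "") = pvStart := by simpa using hQr
      have hnoQ : ∀ j, s + 1 ≤ j → j < r →
          ¬ PySem.Str.strip (lines.getD j "") = pvStart := by
        intro j h1 h2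
        have := hminr j h1 h2
        simpa using this
      have hblock := pvBlockStep lines s r hslen (by omega) (by omega)
        hnoQ (Or.inr hQr')
      rw [hblock]
      have hrestr : (r :: rest') = (List.range' r (lines.length - r)).filter
          (fun i => PySem.Str.strip (lines.getD i "") == pvStart) := by
        rw [hrest']
        rw [pvFilterShift (fun i => PySem.Str.strip (lines.getD i "") == pvStart)
          (s + 1) r (lines.length - (s + 1)) hsr (by omega)
          (fun j h1 h2 => by simpa using hminr j h1 h2)]
        congr 2; omega
      have hrestr2 : rest = (List.range' r (lines.length - r)).filter
          (fun i => PySem.Str.strip (lines.getD i "") == pvStart) := by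
        rw [hr]; exact hrestr
      have hih := ih r hrestr2 (by omega)
      rw [hr] at hih
      rw [hih]
      simp

theorem pvBoth (lines : List String) :
    (let st := lines.foldl pvStepA ([], [], false);
     if st.2.1 ≠ [] ∧ st.2.2 then st.1 ++ [PySem.Str.join "\n" st.2.1] else st.1) =
    ((((List.range lines.length).filter
        (fun i => PySem.Str.strip (lines.getD i "") == pvStart)).zip
      ((((List.range lines.length).filter
        (fun i => PySem.Str.strip (lines.getD i "") == pvStart)).drop 1) ++ [lines.length])).map
        (fun p => PySem.Str.join "\n" (pvBlockOf ((lines.drop p.1).take (p.2 - p.1))))) := by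
  have hA := pvFoldA lines [] none (by intro c hc; cases hc)
  have hB := pvMainB lines
      ((List.range' 0 lines.length).filter
        (fun i => PySem.Str.strip (lines.getD i "") == pvStart)) 0 (by simp) (Nat.zero_le _)
  simp only [List.drop_zero] at hB
  simp only [Option.getD, Option.isSome] at hA
  rw [List.range_eq_range']
  exact hA.trans (by simpa using hB)

-- ===== VERDICT (by name: the statement is the Claim_ definition above) =====
theorem split_python_tracebacks_py_spec : Claim_equal_split_python_tracebacks_py := by
  intro content _
  show split_python_tracebacks_py content = split_python_tracebacks_py_alt content
  exact pvBoth ((PySem.Str.split? content "\n").getD [])
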